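-- pv_equiv track=rewrite | github.com/thebringerofdeath789/nfsp00f3r-V4.06 | visa_card_extractor_advanced.py | bcd_to_string
-- ===== SOURCE A (Python) =====
-- from typing import Dict, List, Optional, Tuple, Any
--
-- def bcd_to_string(bcd_data: List[int]) -> str:
--     """Convert BCD encoded data to string"""
--     result = ""
--     for byte in bcd_data:
--         high_nibble = (byte >> 4) & 0x0F
--         low_nibble = byte & 0x0F
--
--         if high_nibble <= 9:
--             result += str(high_nibble)
--         if low_nibble <= 9:
--             result += str(low_nibble)
--     return result
-- ===== SOURCE B (Python) =====
-- def bcd_to_string(bcd_data):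
--     """Convert BCD encoded data to string"""
--     s = ''.join(f"{b & 0xFF:02x}" for b in bcd_data)
--     return ''.join(c for c in s if c.isdigit())
-- ===== Notes on version B (the rewrite author's own statement) =====
-- stated objective: idiomatic
-- what changed: Instead of A's per-byte nibble shifting/masking with two conditional string appends inside a loop, B renders the whole input as a lowercase hex string in one join and then filters it to the decimal digits (hex 'a'-'f' are exactly the skipped BCD nibbles 10-15).
import Mathlib
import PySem

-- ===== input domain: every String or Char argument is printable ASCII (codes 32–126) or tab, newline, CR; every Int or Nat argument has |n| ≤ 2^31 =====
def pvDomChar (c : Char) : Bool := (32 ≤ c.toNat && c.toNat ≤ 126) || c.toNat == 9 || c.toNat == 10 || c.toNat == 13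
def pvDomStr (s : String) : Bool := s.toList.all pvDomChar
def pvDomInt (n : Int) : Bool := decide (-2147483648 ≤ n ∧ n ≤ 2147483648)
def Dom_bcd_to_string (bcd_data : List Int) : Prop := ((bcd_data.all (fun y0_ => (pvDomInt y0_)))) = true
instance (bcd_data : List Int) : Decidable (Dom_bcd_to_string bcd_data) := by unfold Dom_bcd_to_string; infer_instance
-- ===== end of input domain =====

-- B re-renders each byte as two lowercase hex chars and keeps only the decimal digits ('a'-'f'
-- are exactly the skipped BCD nibbles 10-15); idiomatic two-liner, same O(n) cost as A.

-- ===== PORT A =====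
-- the body of A's for-loop over `result` (strings ported over List Char, as PySem prescribes)
def pvStepA (result : List Char) (byte : Int) : List Char :=
  let high_nibble := PySem.Int.band (byte >>> (4 : Nat)) 15
  let low_nibble := PySem.Int.band byte 15
  let result := if high_nibble ≤ 9 then result ++ PySem.Int.toChars high_nibble else result
  let result := if low_nibble ≤ 9 then result ++ PySem.Int.toChars low_nibble else result
  result

def bcd_to_string (bcd_data : List Int) : String :=
  String.ofList (bcd_data.foldl pvStepA [])

-- ===== PORT B =====
-- f"{b & 0xFF:02x}": two lowercase hex digits of b & 0xFF
def pvHexChar (n : Nat) : Char := if n < 10 then Char.ofNat (48 + n) else Char.ofNat (87 + n)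

def pvHexPair (b : Int) : List Char :=
  let m := (PySem.Int.band b 255).toNat
  [pvHexChar (m / 16), pvHexChar (m % 16)]

def bcd_to_string_alt (bcd_data : List Int) : String :=
  String.ofList ((bcd_data.flatMap pvHexPair).filter PySem.Chars.isdigit)

-- ===== PRECONDITION & SPEC =====
def Spec_bcd_to_string (bcd_data : List Int) (out : String) : Prop := out = bcd_to_string_alt bcd_data
instance (bcd_data : List Int) (out : String) : Decidable (Spec_bcd_to_string bcd_data out) := by unfold Spec_bcd_to_string; infer_instance

-- ===== CLAIM (what is proved, stated in full; the proofs are below) =====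
def Claim_equal_bcd_to_string : Prop := ∀ (bcd_data : List Int), Dom_bcd_to_string bcd_data → Spec_bcd_to_string bcd_data (bcd_to_string bcd_data)

-- ===== LEMMAS AND PROOFS =====

-- Python x & 15 is x mod 16 (floor mod; divisor positive, so Lean's emod).
theorem pv_band15 (x : Int) : PySem.Int.band x 15 = x % 16 := by
  unfold PySem.Int.band
  have h1 : ∀ n : Nat, n &&& 15 = n % 16 := by
    intro n
    have := Nat.and_two_pow_sub_one_eq_mod n 4
    norm_num at this; omega
  by_cases hx : 0 ≤ x
  · simp only [hx, if_true, show (0:Int) ≤ 15 by norm_num, if_true,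
      show ((15:Int).toNat) = 15 from rfl, h1]
    omega
  · simp only [hx, if_false, show (0:Int) ≤ 15 by norm_num, if_true,
      show ((15:Int).toNat) = 15 from rfl, Nat.and_comm 15, h1]
    omega

-- Python x & 255 is x mod 256.
theorem pv_band255 (x : Int) : PySem.Int.band x 255 = x % 256 := by
  unfold PySem.Int.band
  have h1 : ∀ n : Nat, n &&& 255 = n % 256 := by
    intro n
    have := Nat.and_two_pow_sub_one_eq_mod n 8
    norm_num at this; omega
  by_cases hx : 0 ≤ x
  · simp only [hx, if_true, show (0:Int) ≤ 255 by norm_num, if_true,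
      show ((255:Int).toNat) = 255 from rfl, h1]
    omega
  · simp only [hx, if_false, show (0:Int) ≤ 255 by norm_num, if_true,
      show ((255:Int).toNat) = 255 from rfl, Nat.and_comm 255, h1]
    omega

-- nibble by nibble (every nibble is in [0,16)): A keeps it iff its hex char is a digit
theorem pv_nibble : ∀ n : Fin 16,
    (if ((n : Nat) : Int) ≤ 9 then PySem.Int.toChars ((n : Nat) : Int) else []) =
      (if PySem.Chars.isdigit (pvHexChar n) then [pvHexChar n] else []) := by
  decide

-- per byte: the digits A appends = B's two hex chars filtered to digits
theorem pv_byte (b : Int) :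
    ((if PySem.Int.band (b >>> (4 : Nat)) 15 ≤ 9
        then PySem.Int.toChars (PySem.Int.band (b >>> (4 : Nat)) 15) else []) ++
     (if PySem.Int.band b 15 ≤ 9 then PySem.Int.toChars (PySem.Int.band b 15) else [])) =
      (pvHexPair b).filter PySem.Chars.isdigit := by
  unfold pvHexPair
  have hsh : b >>> (4 : Nat) = b / 16 := by
    have := Int.shiftRight_eq_div_pow b 4; norm_num at this; exact this
  rw [hsh, pv_band15, pv_band15, pv_band255]
  set m : Nat := (b % 256).toNat with hmdef
  have hmlt : m < 256 := by
    have h1 : b % 256 < 256 := Int.emod_lt_of_pos b (by norm_num)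
    omega
  have hh : b / 16 % 16 = ((m / 16 : Nat) : Int) := by omega
  have hl : b % 16 = ((m % 16 : Nat) : Int) := by omega
  rw [hh, hl]
  have e1 := pv_nibble ⟨m / 16, by omega⟩
  have e2 := pv_nibble ⟨m % 16, by omega⟩
  simp only [List.filter]
  simp only at e1 e2
  rw [e1, e2]
  cases PySem.Chars.isdigit (pvHexChar (m / 16)) <;>
    cases PySem.Chars.isdigit (pvHexChar (m % 16)) <;> simp

-- one loop iteration of A appends exactly B's per-byte contribution
theorem pv_step (acc : List Char) (b : Int) :
    pvStepA acc b = acc ++ (pvHexPair b).filter PySem.Chars.isdigit := by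
  rw [← pv_byte b]
  unfold pvStepA
  by_cases h1 : PySem.Int.band (b >>> (4 : Nat)) 15 ≤ 9 <;>
    by_cases h2 : PySem.Int.band b 15 ≤ 9 <;>
      simp [h1, h2, List.append_assoc]

-- A's loop, from any accumulator, produces B's filtered hex rendering
theorem pv_fold (xs : List Int) (acc : List Char) :
    xs.foldl pvStepA acc = acc ++ (xs.flatMap pvHexPair).filter PySem.Chars.isdigit := by
  induction xs generalizing acc with
  | nil => simp
  | cons b xs ih =>
    rw [List.foldl_cons, pv_step, ih, List.flatMap_cons, List.filter_append,
      List.append_assoc]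

-- ===== VERDICT (by name: the statement is the Claim_ definition above) =====
theorem bcd_to_string_spec : Claim_equal_bcd_to_string := by
  intro xs _
  unfold Spec_bcd_to_string bcd_to_string bcd_to_string_alt
  rw [pv_fold]
  simp
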